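-- pv_equiv track=rewrite | github.com/elianap11/daily_pyhton | contador_palabras.py | contar_palabras_y_encontrar_mas_larga
-- ===== SOURCE A (Python) =====
-- def contar_palabras_y_encontrar_mas_larga(oracion):
--     # Inicializar el contador de palabras y la palabra más larga
--     cantidad_palabras = 0
--     palabra_mas_larga = ""
--
--     # Recorrer cada palabra en la oración separando en espacios
--     for palabra in oracion.split():  # Utilizamos split para separar palabras
--         cantidad_palabras += 1  # Aumentar el contador por cada palabra
--         if len(palabra) > len(palabra_mas_larga):
--             palabra_mas_larga = palabra  # Actualizar la palabra más larga
--
--     # Devolver los resultados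
--     return cantidad_palabras, palabra_mas_larga
-- ===== SOURCE B (Python) =====
-- def contar_palabras_y_encontrar_mas_larga(oracion):
--     palabras = oracion.split()
--     if not palabras:
--         return 0, ""
--     ordenadas = sorted(palabras, key=len, reverse=True)
--     return len(palabras), ordenadas[0]
-- ===== Notes on version B (the rewrite author's own statement) =====
-- stated objective: alternative
-- what changed: Replaces A's single-pass running-maximum accumulator loop with a stable length-descending sort of the word list and taking its head (stability preserves A's first-wins tie behaviour), with an explicit empty-sentence case.
import Mathlib
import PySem

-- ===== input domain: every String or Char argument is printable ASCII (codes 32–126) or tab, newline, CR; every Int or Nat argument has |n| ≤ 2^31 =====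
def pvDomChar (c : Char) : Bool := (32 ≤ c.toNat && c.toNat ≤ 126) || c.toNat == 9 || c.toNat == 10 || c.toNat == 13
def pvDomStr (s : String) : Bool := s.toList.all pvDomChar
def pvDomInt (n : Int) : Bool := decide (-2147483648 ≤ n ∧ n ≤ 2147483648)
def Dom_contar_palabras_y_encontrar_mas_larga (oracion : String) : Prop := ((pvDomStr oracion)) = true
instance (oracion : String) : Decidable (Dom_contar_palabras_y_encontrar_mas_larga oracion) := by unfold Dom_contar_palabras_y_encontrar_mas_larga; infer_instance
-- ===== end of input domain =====

-- B replaces A's single-pass running-maximum loop with a stable length-descending sort of the word list and taking its head; objective: alternative.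

-- ===== PORT A =====
-- A: one loop over oracion.split() carrying (cantidad_palabras, palabra_mas_larga).
def contar_palabras_y_encontrar_mas_larga (oracion : String) : Int × String :=
  (PySem.Str.split₀ oracion).foldl
    (fun acc palabra =>
      (acc.1 + 1,
       if PySem.Str.len palabra > PySem.Str.len acc.2 then palabra else acc.2))
    ((0 : Int), "")

-- ===== PORT B =====
-- B: split once; if no words return (0, ""); else stable-sort by length descending and take the head
-- (ordenadas[0] is exact here: the list is nonempty under the guard).
def contar_palabras_y_encontrar_mas_larga_alt (oracion : String) : Int × String :=
  let palabras := PySem.Str.split₀ oracion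
  if palabras = [] then ((0 : Int), "")
  else
    let ordenadas := PySem.List.sorted palabras PySem.Str.len true
    ((palabras.length : Int), ordenadas.headD "")

-- ===== PRECONDITION & SPEC =====
def Spec_contar_palabras_y_encontrar_mas_larga (oracion : String) (out : Int × String) : Prop := out = contar_palabras_y_encontrar_mas_larga_alt oracion
instance (oracion : String) (out : Int × String) : Decidable (Spec_contar_palabras_y_encontrar_mas_larga oracion out) := by unfold Spec_contar_palabras_y_encontrar_mas_larga; infer_instance

-- ===== CLAIM (what is proved, stated in full; the proofs are below) =====
def Claim_equal_contar_palabras_y_encontrar_mas_larga : Prop := ∀ (oracion : String), Dom_contar_palabras_y_encontrar_mas_larga oracion → Spec_contar_palabras_y_encontrar_mas_larga oracion (contar_palabras_y_encontrar_mas_larga oracion)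

-- ===== LEMMAS AND PROOFS =====

-- the longest-word half of A's accumulator step
def pvStep (m w : String) : String :=
  if PySem.Str.len w > PySem.Str.len m then w else m

-- A's fused fold splits into a count and a pvStep fold
theorem pvFoldSplit (ws : List String) (c : Int) (m : String) :
    ws.foldl
      (fun acc palabra =>
        (acc.1 + 1,
         if PySem.Str.len palabra > PySem.Str.len acc.2 then palabra else acc.2))
      (c, m)
    = (c + ws.length, ws.foldl pvStep m) := by
  induction ws generalizing c m with
  | nil => simp
  | cons w t ih =>
      simp only [List.foldl_cons, ih, pvStep, List.length_cons, Prod.mk.injEq]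
      refine ⟨by omega, trivial⟩

theorem pvStepEmpty (w : String) : pvStep "" w = w := by
  unfold pvStep
  split
  · rfl
  · rename_i h
    have h0 : ("" : String).toList = [] := by decide
    simp only [gt_iff_lt, not_lt, PySem.Str.len_eq, h0, List.length_nil,
      Nat.cast_zero] at h
    have hl : w.toList.length = 0 := by omega
    exact (String.toList_inj.mp (by simp [List.length_eq_zero_iff.mp hl])).symm

-- head of an insertion into a nonempty list
theorem pvInsHead (bef : String → String → Bool) (x m : String) (t : List String) :
    (PySem.List.insertBy bef x (m :: t)).head? = some (if bef x m then x else m) := by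
  by_cases h : bef x m = true <;> simp [PySem.List.insertBy, h]

-- the head of the stable length-descending sort is the first length-maximal word
theorem pvSortedHead (ws : List String) :
    (PySem.List.sorted ws PySem.Str.len true).head?
      = PySem.List.max? ws PySem.Str.len := by
  induction ws using List.reverseRecOn with
  | nil => rfl
  | append_singleton ys x ih =>
      unfold PySem.List.sorted PySem.List.max? at *
      simp only [if_true, List.foldl_append, List.foldl_cons, List.foldl_nil] at *
      cases hacc : List.foldl
          (fun acc x => PySem.List.insertBy (fun a b => decide (PySem.Str.len b < PySem.Str.len a)) x acc)
          [] ys with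
      | nil =>
          rw [hacc] at ih
          simp only [List.head?_nil] at ih
          rw [← ih]
          rfl
      | cons m t =>
          rw [hacc] at ih
          simp only [List.head?_cons] at ih
          rw [pvInsHead, ← ih]
          simp only [decide_eq_true_eq]
          exact apply_ite some (PySem.Str.len m < PySem.Str.len x) x m

-- an Option-seeded fold whose step preserves `some` is the underlying fold
theorem pvOptFold {α : Type} (f : Option α → α → Option α) (g : α → α → α)
    (h : ∀ m w, f (some m) w = some (g m w)) :
    ∀ (ws : List α) (m : α), ws.foldl f (some m) = some (ws.foldl g m) := by
  intro ws
  induction ws with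
  | nil => intro m; rfl
  | cons w t ih => intro m; rw [List.foldl_cons, h, ih, List.foldl_cons]

-- A's running-max fold on a nonempty list is max?
theorem pvMaxCons (w : String) (t : List String) :
    PySem.List.max? (w :: t) PySem.Str.len = some (t.foldl pvStep w) := by
  unfold PySem.List.max?
  rw [List.foldl_cons]
  simp only []
  exact pvOptFold _ pvStep
    (fun m x => by simp only [pvStep, gt_iff_lt, apply_ite some]) t w

-- ===== VERDICT (by name: the statement is the Claim_ definition above) =====
theorem contar_palabras_y_encontrar_mas_larga_spec : Claim_equal_contar_palabras_y_encontrar_mas_larga := by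
  intro oracion _
  unfold Spec_contar_palabras_y_encontrar_mas_larga contar_palabras_y_encontrar_mas_larga contar_palabras_y_encontrar_mas_larga_alt
  rw [pvFoldSplit]
  cases hws : PySem.Str.split₀ oracion with
  | nil => simp
  | cons w t =>
      have hmax := pvSortedHead (w :: t)
      rw [pvMaxCons] at hmax
      simp only [List.foldl_cons, pvStepEmpty, if_neg (List.cons_ne_nil w t),
        List.headD_eq_head?_getD, hmax, Option.getD_some, List.length_cons,
        Nat.cast_add, Nat.cast_one, zero_add]
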